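-- pv_equiv track=rewrite | github.com/dmdsiz/- | series_5_ad/2. geohash.py | geo2dec
-- ===== SOURCE A (Python) =====
-- def geo2dec(geohash):
--     geohash =geohash [::-1]  # reverse the geohash
--     list = []
--     count = -1
--     sum = 0
--     for i in geohash.lower():     # use the ascii code to change letters to numbers
--         if 47 < ord(i) < 58:
--             list.append(ord(i)-48)
--         if 97 < ord(i) < 105:
--             list.append(ord(i)-88)
--         if 105 < ord(i) < 108:
--             list.append(ord(i)-89)
--         if 108 < ord(i) < 111:
--             list.append(ord(i)-90)
--         if 111 < ord(i) < 123:
--             list.append(ord(i)-91)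
--     for j in list:
--         count +=1               #count is for power
--         sum += j * (32**count)
--     return sum
-- ===== SOURCE B (Python) =====
-- def geo2dec(geohash):
--     # Horner's method: one left-to-right pass, one multiply per digit
--     # (no reversal, no digit list, no 32**k big-power per digit).
--     val = 0
--     for c in geohash.lower():
--         o = ord(c)
--         if 47 < o < 58:
--             d = o - 48
--         elif 97 < o < 105:
--             d = o - 88
--         elif 105 < o < 108:
--             d = o - 89
--         elif 108 < o < 111:
--             d = o - 90
--         elif 111 < o < 123:
--             d = o - 91
--         else:
--             continue
--         val = val * 32 + d
--     return val
-- ===== Notes on version B (the rewrite author's own statement) =====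
-- stated objective: faster
-- what changed: Replaces A's reverse-then-collect-digits-then-sum-with-32**k-per-digit two-pass scheme by a single left-to-right Horner pass (val = val*32 + d), eliminating the reversal, the intermediate digit list and the repeated big-integer power computation.
import Mathlib
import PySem

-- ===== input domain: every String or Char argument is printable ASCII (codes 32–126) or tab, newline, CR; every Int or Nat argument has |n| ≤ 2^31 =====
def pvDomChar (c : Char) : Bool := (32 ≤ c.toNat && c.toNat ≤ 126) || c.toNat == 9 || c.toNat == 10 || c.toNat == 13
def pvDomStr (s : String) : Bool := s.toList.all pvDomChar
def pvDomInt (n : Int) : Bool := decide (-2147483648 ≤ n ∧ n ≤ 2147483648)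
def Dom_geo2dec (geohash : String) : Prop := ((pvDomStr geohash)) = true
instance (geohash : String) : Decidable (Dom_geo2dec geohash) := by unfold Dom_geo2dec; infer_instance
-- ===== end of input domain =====

-- B replaces A's reverse + digit-list + 32**count-per-digit two-pass scheme by a single
-- left-to-right Horner pass (val = val*32 + d); objective: faster (O(n) multiplies).

-- ===== PORT A =====
-- one iteration of A's first loop: four independent `if`s appending to `list`
def geoA_collect (l : List Int) (c : Char) : List Int :=
  let o : Int := (c.toNat : Int)
  let l1 := if 47 < o ∧ o < 58 then l ++ [o - 48] else l
  let l2 := if 97 < o ∧ o < 105 then l1 ++ [o - 88] else l1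
  let l3 := if 105 < o ∧ o < 108 then l2 ++ [o - 89] else l2
  let l4 := if 108 < o ∧ o < 111 then l3 ++ [o - 90] else l3
  if 111 < o ∧ o < 123 then l4 ++ [o - 91] else l4

-- one iteration of A's second loop over state (count, sum)
def geoA_sum (st : Int × Int) (j : Int) : Int × Int :=
  let count := st.1 + 1
  (count, st.2 + j * (32 : Int) ^ count.toNat)

def geo2dec (geohash : String) : Int :=
  -- geohash[::-1]: step -1 never yields none, getD "" is unreachable
  let rev := (PySem.Str.slice? geohash none none (-1)).getD ""
  let list := ((PySem.Str.lower rev).toList).foldl geoA_collect []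
  (list.foldl geoA_sum (-1, 0)).2

-- ===== PORT B =====
-- one iteration of B's Horner loop
def geoB_step (val : Int) (c : Char) : Int :=
  let o : Int := (c.toNat : Int)
  if 47 < o ∧ o < 58 then val * 32 + (o - 48)
  else if 97 < o ∧ o < 105 then val * 32 + (o - 88)
  else if 105 < o ∧ o < 108 then val * 32 + (o - 89)
  else if 108 < o ∧ o < 111 then val * 32 + (o - 90)
  else if 111 < o ∧ o < 123 then val * 32 + (o - 91)
  else val

def geo2dec_alt (geohash : String) : Int :=
  ((PySem.Str.lower geohash).toList).foldl geoB_step 0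

-- ===== PRECONDITION & SPEC =====
def Spec_geo2dec (geohash : String) (out : Int) : Prop := out = geo2dec_alt geohash
instance (geohash : String) (out : Int) : Decidable (Spec_geo2dec geohash out) := by unfold Spec_geo2dec; infer_instance

-- ===== CLAIM (what is proved, stated in full; the proofs are below) =====
def Claim_equal_geo2dec : Prop := ∀ (geohash : String), Dom_geo2dec geohash → Spec_geo2dec geohash (geo2dec geohash)

-- ===== LEMMAS AND PROOFS =====

-- the base-32 digit of a character, if any (the ranges of A's four ifs are disjoint)
def dig? (c : Char) : Option Int :=
  let o : Int := (c.toNat : Int)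
  if 47 < o ∧ o < 58 then some (o - 48)
  else if 97 < o ∧ o < 105 then some (o - 88)
  else if 105 < o ∧ o < 108 then some (o - 89)
  else if 108 < o ∧ o < 111 then some (o - 90)
  else if 111 < o ∧ o < 123 then some (o - 91)
  else none

-- little-endian value of a digit list
def litval : List Int → Int
  | [] => 0
  | d :: t => d + 32 * litval t

lemma collect_step (l : List Int) (c : Char) :
    geoA_collect l c = l ++ (dig? c).toList := by
  simp only [geoA_collect, dig?]
  split_ifs <;> simp_all <;> omega

lemma collect_fold (cs : List Char) (l : List Int) :
    cs.foldl geoA_collect l = l ++ cs.filterMap dig? := by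
  induction cs generalizing l with
  | nil => simp
  | cons c t ih =>
      simp only [List.foldl_cons, collect_step, ih, List.filterMap_cons]
      cases dig? c <;> simp

lemma litval_append_single (R : List Int) (d : Int) :
    litval (R ++ [d]) = litval R + d * 32 ^ R.length := by
  induction R with
  | nil => simp [litval]
  | cons x t ih => simp [litval, ih]; ring

lemma sum_fold (L : List Int) (c s : Int) (hc : -1 ≤ c) :
    L.foldl geoA_sum (c, s) = (c + L.length, s + 32 ^ (c + 1).toNat * litval L) := by
  induction L generalizing c s with
  | nil => simp [litval]
  | cons d t ih =>
      simp only [List.foldl_cons, geoA_sum, litval]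
      rw [ih (c + 1) _ (by omega)]
      refine Prod.ext ?_ ?_
      · simp; omega
      · have h1 : (c + 1 + 1).toNat = (c + 1).toNat + 1 := by omega
        simp [h1, pow_succ]
        ring

lemma bstep_eq (v : Int) (c : Char) :
    geoB_step v c = (match dig? c with | some d => v * 32 + d | none => v) := by
  simp only [geoB_step, dig?]
  split_ifs <;> rfl

lemma b_fold (cs : List Char) (v : Int) :
    cs.foldl geoB_step v = (cs.filterMap dig?).foldl (fun v d => v * 32 + d) v := by
  induction cs generalizing v with
  | nil => rfl
  | cons c t ih =>
      simp only [List.foldl_cons, bstep_eq, List.filterMap_cons]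
      cases dig? c <;> simp [ih]

lemma horner_eq_litval (ds : List Int) (a : Int) :
    ds.foldl (fun v d => v * 32 + d) a = a * 32 ^ ds.length + litval ds.reverse := by
  induction ds generalizing a with
  | nil => simp [litval]
  | cons d t ih =>
      simp only [List.foldl_cons, ih, List.reverse_cons, litval_append_single,
        List.length_cons, List.length_reverse]
      ring

-- ===== VERDICT (by name: the statement is the Claim_ definition above) =====
theorem geo2dec_spec : Claim_equal_geo2dec := by
  intro geohash _
  unfold Spec_geo2dec geo2dec geo2dec_alt
  rw [PySem.Str.slice?_none_none_neg_one]
  simp only [Option.getD_some, PySem.Str.toList_lower, PySem.Chars.lower,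
    String.toList_ofList, List.map_reverse]
  rw [collect_fold, b_fold, horner_eq_litval]
  rw [List.filterMap_reverse, sum_fold _ _ _ (by omega)]
  simp
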